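-- pv_equiv track=rewrite | github.com/RichardDKlein/whiteboard-py | src/arrays/array_hopscotch.py | _helper
-- ===== SOURCE A (Python) =====
-- def _helper(
--     a: tuple[int, ...], i_start: int, visited: set[int]
-- ) -> set[tuple[int, ...]]:
--     """
--     Helper function to perform loop detection.
--
--     :param a: (Same as in main function.)
--     :param i_start: (Same as in main function.)
--     :param visited: A set of indices that have already been visited during
--     our game of array hopscotch. Do not continue to explore any paths that
--     land on any of these indices.
--     :return: (Same as in main function.)
--     """
--     result = set()
--     # error checking
--     if not isinstance(a, tuple) or not (0 <= i_start < len(a)) or a[i_start] < 0: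
--         return result
--     # loop detection
--     if i_start in visited:
--         return result
--     # base case
--     if a[i_start] == 0:
--         result.add((i_start,))
--         return result
--     # recursive step
--     visited.add(i_start)  # don't revisit starting index
--     for i_hop in (i_start - a[i_start], i_start + a[i_start]):
--         remaining_paths = _helper(a, i_hop, visited)
--         for path in remaining_paths:
--             result.add((i_start,) + path)
--     visited.remove(i_start)  # ok to revisit starting index
--     return result
-- ===== SOURCE B (Python) =====
-- def _helper(a, i_start, visited):
--     """Iterative explicit-stack DFS; threads the ancestor path per stack entry
--     instead of mutating a shared visited set (visited is never modified)."""
--     result = set()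
--     if not isinstance(a, tuple):
--         return result
--     stack = [(i_start, ())]
--     while stack:
--         i, anc = stack.pop()
--         if not (0 <= i < len(a)) or a[i] < 0:
--             continue
--         if i in visited or i in anc:
--             continue
--         if a[i] == 0:
--             result.add(anc + (i,))
--             continue
--         stack.append((i + a[i], anc + (i,)))
--         stack.append((i - a[i], anc + (i,)))
--     return result
-- ===== Notes on version B (the rewrite author's own statement) =====
-- stated objective: alternative
-- what changed: Recursive backtracking DFS that mutates a shared visited set is replaced by an iterative explicit-stack DFS whose work-list entries carry their own ancestor path, leaving the visited argument untouched.
import Mathlib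
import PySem

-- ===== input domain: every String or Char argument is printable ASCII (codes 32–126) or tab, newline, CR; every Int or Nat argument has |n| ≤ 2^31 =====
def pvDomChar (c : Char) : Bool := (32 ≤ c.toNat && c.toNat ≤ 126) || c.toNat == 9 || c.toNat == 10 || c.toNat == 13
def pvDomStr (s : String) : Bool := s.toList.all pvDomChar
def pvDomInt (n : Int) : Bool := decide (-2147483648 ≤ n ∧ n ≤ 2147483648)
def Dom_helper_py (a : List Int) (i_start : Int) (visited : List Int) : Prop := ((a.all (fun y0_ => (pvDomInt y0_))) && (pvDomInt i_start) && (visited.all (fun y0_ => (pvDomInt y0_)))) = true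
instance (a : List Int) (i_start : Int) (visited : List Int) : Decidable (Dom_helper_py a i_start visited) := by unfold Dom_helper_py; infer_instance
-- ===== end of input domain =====

-- B replaces A's recursive backtracking DFS (which temporarily mutates the shared visited
-- set and restores it before returning) by an iterative explicit-stack DFS whose work-list
-- entries carry their own ancestor path; same result set, visited never modified.
-- Equivalence is about the RETURN value (A's net mutation of visited is nil anyway).

-- ===== PORT A =====
-- termination measure: number of in-range indices not yet in the visited set
def freeCount (n : Nat) (blocked : List Int) : Nat :=
  ((Finset.range n).filter (fun j : Nat => (j : Int) ∉ blocked)).card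

theorem freeCount_lt (n : Nat) (b : List Int) (i : Int)
    (h0 : 0 ≤ i) (h1 : i < (n : Int)) (h2 : i ∉ b) :
    freeCount n (b ++ [i]) < freeCount n b := by
  apply Finset.card_lt_card
  constructor
  · intro j hj
    simp only [Finset.mem_filter, Finset.mem_range, List.mem_append] at hj ⊢
    exact ⟨hj.1, fun hm => hj.2 (Or.inl hm)⟩
  · intro hsub
    have hi : i.toNat ∈ (Finset.range n).filter (fun j : Nat => (j : Int) ∉ b) := by
      simp only [Finset.mem_filter, Finset.mem_range]
      constructor
      · omega
      · rwa [Int.toNat_of_nonneg h0]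
    have := hsub hi
    simp [Int.toNat_of_nonneg h0] at this

-- recursive DFS, literal transliteration of A (visited passed functionally:
-- A adds i, recurses on both hops, then removes i, so both recursive calls
-- see visited ∪ {i} and the caller's set is unchanged)
def goA (a : List Int) (i : Int) (visited : List Int) : List (List Int) :=
  if h : 0 ≤ i ∧ i < (a.length : Int) then
    if (PySem.List.pyGet? a i).getD 0 < 0 then []
    else if hv : i ∈ visited then []
    else if (PySem.List.pyGet? a i).getD 0 = 0 then PySem.Set.add [] [i]
    else
      (goA a (i - (PySem.List.pyGet? a i).getD 0) (PySem.Set.add visited i) ++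
       goA a (i + (PySem.List.pyGet? a i).getD 0) (PySem.Set.add visited i)).foldl
        (fun r p => PySem.Set.add r (i :: p)) []
  else []
termination_by freeCount a.length visited
decreasing_by
  all_goals
    rw [PySem.Set.add_of_not_mem hv]
    exact freeCount_lt a.length visited i h.1 h.2 hv

def helper_py (a : List Int) (i_start : Int) (visited : List Int) : List (List Int) :=
  goA a i_start visited

-- ===== PORT B =====
-- iterative explicit-stack DFS from Source B: the Lean list head is the Python stack top
-- (pop from the head, push onto the head), so the left hop is processed first
def goB (a : List Int) (visited : List Int)
    (stack : List (Int × List Int)) (acc : List (List Int)) : List (List Int) :=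
  match stack with
  | [] => acc
  | (i, anc) :: rest =>
    if h : 0 ≤ i ∧ i < (a.length : Int) then
      if (PySem.List.pyGet? a i).getD 0 < 0 then goB a visited rest acc
      else if hv : i ∈ visited ∨ i ∈ anc then goB a visited rest acc
      else if (PySem.List.pyGet? a i).getD 0 = 0 then goB a visited rest (PySem.Set.add acc (anc ++ [i]))
      else goB a visited ((i - (PySem.List.pyGet? a i).getD 0, anc ++ [i]) ::
             (i + (PySem.List.pyGet? a i).getD 0, anc ++ [i]) :: rest) acc
    else goB a visited rest acc
termination_by (stack.map (fun e => 3 ^ freeCount a.length (visited ++ e.2))).sum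
decreasing_by
  all_goals simp only [List.map_cons, List.sum_cons]
  case _ =>
    have : 0 < 3 ^ freeCount a.length (visited ++ anc) := Nat.pow_pos (by omega)
    omega
  case _ =>
    have : 0 < 3 ^ freeCount a.length (visited ++ anc) := Nat.pow_pos (by omega)
    omega
  case _ =>
    have : 0 < 3 ^ freeCount a.length (visited ++ anc) := Nat.pow_pos (by omega)
    omega
  case _ =>
    have hni : i ∉ visited ++ anc := by
      simp only [List.mem_append]; exact hv
    have hk : freeCount a.length ((visited ++ anc) ++ [i]) < freeCount a.length (visited ++ anc) :=
      freeCount_lt a.length (visited ++ anc) i h.1 h.2 hni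
    have he : visited ++ (anc ++ [i]) = (visited ++ anc) ++ [i] := (List.append_assoc _ _ _).symm
    rw [he]
    set k1 := freeCount a.length ((visited ++ anc) ++ [i])
    set k := freeCount a.length (visited ++ anc)
    have h31 : 3 ^ k1 * 3 ≤ 3 ^ k := by
      calc 3 ^ k1 * 3 = 3 ^ (k1 + 1) := by ring
        _ ≤ 3 ^ k := Nat.pow_le_pow_right (by omega) (by omega)
    have hp : 0 < 3 ^ k1 := Nat.pow_pos (by omega)
    omega
  case _ =>
    have : 0 < 3 ^ freeCount a.length (visited ++ anc) := Nat.pow_pos (by omega)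
    omega

def helper_py_alt (a : List Int) (i_start : Int) (visited : List Int) : List (List Int) :=
  goB a visited [(i_start, [])] []

-- ===== PRECONDITION & SPEC =====
def Spec_helper_py (a : List Int) (i_start : Int) (visited : List Int) (out : List (List Int)) : Prop := out = helper_py_alt a i_start visited
instance (a : List Int) (i_start : Int) (visited : List Int) (out : List (List Int)) : Decidable (Spec_helper_py a i_start visited out) := by unfold Spec_helper_py; infer_instance

-- ===== CLAIM (what is proved, stated in full; the proofs are below) =====
def Claim_equal_helper_py : Prop := ∀ (a : List Int) (i_start : Int) (visited : List Int), Dom_helper_py a i_start visited → Spec_helper_py a i_start visited (helper_py a i_start visited)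

-- ===== LEMMAS AND PROOFS =====

theorem nodup_foldl_add (f : List Int → List Int) :
    ∀ (l : List (List Int)) (acc : List (List Int)), acc.Nodup →
      (l.foldl (fun r p => PySem.Set.add r (f p)) acc).Nodup := by
  intro l
  induction l with
  | nil => intro acc h; simpa using h
  | cons x xs ih =>
    intro acc h
    simp only [List.foldl_cons]
    exact ih _ (PySem.Set.nodup_add _ _ h)

theorem foldl_add_map (f : List Int → List Int) :
    ∀ (l : List (List Int)) (acc : List (List Int)),
      (acc ++ l.map f).Nodup →
      l.foldl (fun r p => PySem.Set.add r (f p)) acc = acc ++ l.map f := by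
  intro l
  induction l with
  | nil => intro acc _; simp
  | cons x xs ih =>
    intro acc h
    have hfx : f x ∉ acc := by
      have := h.disjoint
      intro hm
      exact List.disjoint_left.mp this hm (by simp)
    simp only [List.foldl_cons, PySem.Set.add_of_not_mem hfx]
    rw [ih (acc ++ [f x]) (by simpa using h)]
    simp

theorem goA_nodup (a : List Int) (i : Int) (visited : List Int) :
    (goA a i visited).Nodup := by
  rw [goA]
  split
  · split
    · exact List.nodup_nil
    · split
      · exact List.nodup_nil
      · split
        · exact (PySem.Set.nodup_add _ _ List.nodup_nil)
        · exact nodup_foldl_add _ _ _ List.nodup_nil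
  · exact List.nodup_nil

theorem goA_head (a : List Int) (i : Int) (visited : List Int) :
    ∀ p ∈ goA a i visited, ∃ q, p = i :: q := by
  rw [goA]
  split
  · split
    · simp
    · split
      · simp
      · split
        · intro p hp
          have : p = [i] := by
            simpa [PySem.Set.add] using hp
          exact ⟨[], by simp [this]⟩
        · intro p hp
          rw [PySem.Set.mem_foldl_add] at hp
          rcases hp with h | ⟨b, _, rfl⟩
          · simp at h
          · exact ⟨b, rfl⟩
  · simp

theorem goB_step (a : List Int) (visited : List Int) (n : Nat) :
    ∀ (i : Int) (anc : List Int) (rest : List (Int × List Int)) (acc : List (List Int)),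
      freeCount a.length (visited ++ anc) < n →
      goB a visited ((i, anc) :: rest) acc
        = goB a visited rest
            (((goA a i (visited ++ anc)).map (fun p => anc ++ p)).foldl
              (fun r p => PySem.Set.add r p) acc) := by
  induction n with
  | zero => intro i anc rest acc h; omega
  | succ n ih =>
    intro i anc rest acc hb
    rw [goB, goA]
    by_cases h : 0 ≤ i ∧ i < (a.length : Int)
    · rw [dif_pos h, dif_pos h]
      set ai := (PySem.List.pyGet? a i).getD 0 with hai
      by_cases hneg : ai < 0
      · rw [if_pos hneg, if_pos hneg]; simp
      · rw [if_neg hneg, if_neg hneg]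
        by_cases hv : i ∈ visited ∨ i ∈ anc
        · rw [dif_pos hv, dif_pos (by simpa [List.mem_append] using hv)]
          simp
        · rw [dif_neg hv, dif_neg (by simpa [List.mem_append] using hv)]
          by_cases hz : ai = 0
          · rw [if_pos hz, if_pos hz]
            simp [PySem.Set.add]
          · rw [if_neg hz, if_neg hz]
            have hni : i ∉ visited ++ anc := by simpa [List.mem_append] using hv
            have hlt : freeCount a.length ((visited ++ anc) ++ [i])
                < freeCount a.length (visited ++ anc) :=
              freeCount_lt a.length (visited ++ anc) i h.1 h.2 hni
            have hadd : PySem.Set.add (visited ++ anc) i = visited ++ (anc ++ [i]) := by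
              rw [PySem.Set.add_of_not_mem hni, List.append_assoc]
            have hb1 : freeCount a.length (visited ++ (anc ++ [i])) < n := by
              rw [← List.append_assoc]; omega
            rw [ih (i - ai) (anc ++ [i]) _ acc hb1,
                ih (i + ai) (anc ++ [i]) _ _ hb1]
            rw [hadd]
            set r1 := goA a (i - ai) (visited ++ (anc ++ [i])) with hr1
            set r2 := goA a (i + ai) (visited ++ (anc ++ [i])) with hr2
            congr 1
            -- both accumulators are equal
            have hne : i - ai ≠ i + ai := by omega
            have hdisj : List.Disjoint r1 r2 := by
              intro p hp1 hp2
              obtain ⟨q1, rfl⟩ := goA_head _ _ _ p hp1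
              obtain ⟨q2, he⟩ := goA_head _ _ _ _ hp2
              exact hne (by injection he)
            have hnd : (r1 ++ r2).Nodup :=
              List.Nodup.append (goA_nodup _ _ _) (goA_nodup _ _ _) hdisj
            have hmapnd : ((r1 ++ r2).map (fun p => i :: p)).Nodup :=
              hnd.map (fun p q hpq => by injection hpq)
            have hinner : (r1 ++ r2).foldl (fun r p => PySem.Set.add r (i :: p)) []
                = (r1 ++ r2).map (fun p => i :: p) :=
              foldl_add_map _ (r1 ++ r2) [] (by simpa using hmapnd)
            rw [hinner, List.map_map]
            have hfun : ((fun p => anc ++ p) ∘ fun p => i :: p)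
                = fun p => (anc ++ [i]) ++ p := by
              funext q; simp
            rw [hfun, List.map_append, List.foldl_append]
    · rw [dif_neg h, dif_neg h]; simp

-- ===== VERDICT (by name: the statement is the Claim_ definition above) =====
theorem helper_py_spec : Claim_equal_helper_py := by
  intro a i visited _
  unfold Spec_helper_py helper_py helper_py_alt
  rw [goB_step a visited (freeCount a.length (visited ++ []) + 1) i [] [] []
      (by omega)]
  rw [goB]
  have hmap : (goA a i (visited ++ [])).map (fun p => [] ++ p) = goA a i visited := by
    simp
  rw [hmap]
  rw [foldl_add_map (fun p => p) _ [] (by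
    simpa using List.Nodup.map (f := fun p => p) (fun p q h => h) (goA_nodup a i visited))]
  simp
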